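-- pv_equiv track=rewrite | github.com/mbulkeley/statefacts-api | app/state_routes.py | normalize_timezone
-- ===== SOURCE A (Python) =====
-- def normalize_timezone(input_tz):
--     tz_map = {
--         "EST": ["EST", "EDT", "EASTERN", "EASTERN STANDARD TIME", "EASTERN DAYLIGHT TIME"],
--         "CST": ["CST", "CDT", "CENTRAL", "CENTRAL STANDARD TIME", "CENTRAL DAYLIGHT TIME"],
--         "MST": ["MST", "MDT", "MOUNTAIN", "MOUNTAIN STANDARD TIME", "MOUNTAIN DAYLIGHT TIME"],
--         "PST": ["PST", "PDT", "PACIFIC", "PACIFIC STANDARD TIME", "PACIFIC DAYLIGHT TIME"]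
--     }
--     input_upper = input_tz.strip().upper()
--     for standard, aliases in tz_map.items():
--         if input_upper in aliases:
--             return standard
--     return None
-- ===== SOURCE B (Python) =====
-- _REGIONS = {"E": "EASTERN", "C": "CENTRAL", "M": "MOUNTAIN", "P": "PACIFIC"}
--
-- def normalize_timezone(input_tz):
--     # Decode the string's structure instead of scanning an alias table:
--     # the first letter names the region; a valid input is either the
--     # three-letter code X[S|D]T or the region word, optionally followed
--     # by " STANDARD TIME" / " DAYLIGHT TIME".
--     s = input_tz.strip().upper()
--     if not s:
--         return None
--     region = _REGIONS.get(s[0])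
--     if region is None:
--         return None
--     if len(s) == 3 and s[1] in "SD" and s[2] == "T":
--         return s[0] + "ST"
--     if s == region or s == region + " STANDARD TIME" or s == region + " DAYLIGHT TIME":
--         return s[0] + "ST"
--     return None
-- ===== Notes on version B (the rewrite author's own statement) =====
-- stated objective: alternative
-- what changed: Replaced A's scan over a table of 20 alias strings by a structural decoder: the first letter of the normalized input selects the region, and the remainder is checked against the grammar of a three-letter standard/daylight code or the region word optionally followed by a standard/daylight-time suffix, so no alias table or bucket scan exists in B.
import Mathlib
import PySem

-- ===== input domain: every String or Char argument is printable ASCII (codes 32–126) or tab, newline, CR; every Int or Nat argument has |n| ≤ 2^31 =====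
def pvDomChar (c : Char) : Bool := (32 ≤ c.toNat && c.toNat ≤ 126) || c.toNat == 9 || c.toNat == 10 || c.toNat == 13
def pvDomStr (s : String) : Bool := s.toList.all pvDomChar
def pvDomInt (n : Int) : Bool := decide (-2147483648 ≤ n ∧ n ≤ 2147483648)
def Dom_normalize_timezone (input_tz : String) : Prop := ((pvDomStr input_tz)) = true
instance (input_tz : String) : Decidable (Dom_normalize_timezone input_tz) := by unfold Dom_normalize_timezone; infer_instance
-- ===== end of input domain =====

-- B replaces A's scan over a 20-entry alias table by a structural decoder:
-- the first letter of the normalized input names the region, and the rest is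
-- checked against the grammar "X[S|D]T" / "REGION[ STANDARD TIME| DAYLIGHT TIME]".

-- ===== PORT A =====
-- tz_map as an insertion-ordered association list (Python dict of lists)
def nzTzMap : List (String × List String) :=
  [("EST", ["EST", "EDT", "EASTERN", "EASTERN STANDARD TIME", "EASTERN DAYLIGHT TIME"]),
   ("CST", ["CST", "CDT", "CENTRAL", "CENTRAL STANDARD TIME", "CENTRAL DAYLIGHT TIME"]),
   ("MST", ["MST", "MDT", "MOUNTAIN", "MOUNTAIN STANDARD TIME", "MOUNTAIN DAYLIGHT TIME"]),
   ("PST", ["PST", "PDT", "PACIFIC", "PACIFIC STANDARD TIME", "PACIFIC DAYLIGHT TIME"])]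

-- the 'for standard, aliases in tz_map.items(): if input_upper in aliases: return standard' loop
def nzLoop (items : List (String × List String)) (inputUpper : String) : Option String :=
  match items with
  | [] => none
  | (standard, aliases) :: rest =>
      if aliases.contains inputUpper then some standard else nzLoop rest inputUpper

def normalize_timezone (input_tz : String) : Option String :=
  let input_upper := PySem.Str.upper (PySem.Str.strip input_tz)
  nzLoop nzTzMap input_upper

-- ===== PORT B =====
-- _REGIONS: first letter (a one-character Python string, a Char here) -> region word
def nzRegions : PySem.Dict Char String :=
  PySem.Dict.ofList [('E', "EASTERN"), ('C', "CENTRAL"), ('M', "MOUNTAIN"), ('P', "PACIFIC")]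

-- body of Source B after 's = input_tz.strip().upper()', on the code points of s:
-- 'if not s' / 's[0]' become the match on the list; the 'len(s) == 3 and s[1] in
-- "SD" and s[2] == "T"' test matches [c, m, t]; string '+' is '++' on the lists.
def nzDecode (s : List Char) : Option String :=
  match s with
  | [] => none                                   -- if not s: return None
  | c :: rest =>
    match nzRegions.get? c with
    | none => none                               -- region is None: return None
    | some region =>
      if (match rest with                        -- len(s) == 3 and s[1] in "SD" and s[2] == "T"
          | [m, t] => (m == 'S' || m == 'D') && t == 'T'
          | _ => false) then
        some (String.ofList [c, 'S', 'T'])       -- return s[0] + "ST"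
      else if s = region.toList ∨ s = region.toList ++ " STANDARD TIME".toList
              ∨ s = region.toList ++ " DAYLIGHT TIME".toList then
        some (String.ofList [c, 'S', 'T'])       -- return s[0] + "ST"
      else none

def normalize_timezone_alt (input_tz : String) : Option String :=
  nzDecode (PySem.Chars.upper (PySem.Chars.strip input_tz.toList))

-- ===== PRECONDITION & SPEC =====
def Spec_normalize_timezone (input_tz : String) (out : Option String) : Prop := out = normalize_timezone_alt input_tz
instance (input_tz : String) (out : Option String) : Decidable (Spec_normalize_timezone input_tz out) := by unfold Spec_normalize_timezone; infer_instance

-- ===== CLAIM (what is proved, stated in full; the proofs are below) =====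
def Claim_equal_normalize_timezone : Prop := ∀ (input_tz : String), Dom_normalize_timezone input_tz → Spec_normalize_timezone input_tz (normalize_timezone input_tz)

-- ===== LEMMAS AND PROOFS =====

-- B's 'len(s) == 3 and s[1] in "SD" and s[2] == "T"' test on the tail, as the two lists it accepts
lemma nz_three (rest : List Char) :
    (match rest with
     | [m, t] => ((m == 'S' || m == 'D') && t == 'T')
     | _ => false) = (decide (rest = ['S','T']) || decide (rest = ['D','T'])) := by
  rcases rest with _ | ⟨m, _ | ⟨t, _ | ⟨x, r⟩⟩⟩ <;> simp
  by_cases hm : m = 'S' <;> by_cases hm2 : m = 'D' <;> by_cases ht : t = 'T' <;> simp [hm, hm2, ht]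

-- core equivalence: on every list of code points u, A's alias scan over the
-- string ⟨u⟩ returns exactly what B's structural decoder returns on u
lemma nz_core_eq (u : List Char) : nzLoop nzTzMap (String.ofList u) = nzDecode u := by
  rcases u with _ | ⟨c, rest⟩
  · decide
  · have hr := nz_three rest
    by_cases hE : c = 'E'
    · subst hE
      have hg : nzRegions.get? 'E' = some "EASTERN" := by rfl
      by_cases h1 : rest = ['S','T'] <;> by_cases h2 : rest = ['D','T'] <;>
        by_cases h3 : rest = "ASTERN".toList <;> by_cases h4 : rest = "ASTERN STANDARD TIME".toList <;>
        by_cases h5 : rest = "ASTERN DAYLIGHT TIME".toList <;>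
      simp_all [nzLoop, nzTzMap, nzDecode, hg, String.ext_iff, List.cons.injEq]
    · by_cases hC : c = 'C'
      · subst hC
        have hg : nzRegions.get? 'C' = some "CENTRAL" := by rfl
        by_cases h1 : rest = ['S','T'] <;> by_cases h2 : rest = ['D','T'] <;>
          by_cases h3 : rest = "ENTRAL".toList <;> by_cases h4 : rest = "ENTRAL STANDARD TIME".toList <;>
          by_cases h5 : rest = "ENTRAL DAYLIGHT TIME".toList <;>
        simp_all [nzLoop, nzTzMap, nzDecode, hg, String.ext_iff, List.cons.injEq]
      · by_cases hM : c = 'M'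
        · subst hM
          have hg : nzRegions.get? 'M' = some "MOUNTAIN" := by rfl
          by_cases h1 : rest = ['S','T'] <;> by_cases h2 : rest = ['D','T'] <;>
            by_cases h3 : rest = "OUNTAIN".toList <;> by_cases h4 : rest = "OUNTAIN STANDARD TIME".toList <;>
            by_cases h5 : rest = "OUNTAIN DAYLIGHT TIME".toList <;>
          simp_all [nzLoop, nzTzMap, nzDecode, hg, String.ext_iff, List.cons.injEq]
        · by_cases hP : c = 'P'
          · subst hP
            have hg : nzRegions.get? 'P' = some "PACIFIC" := by rfl
            by_cases h1 : rest = ['S','T'] <;> by_cases h2 : rest = ['D','T'] <;>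
              by_cases h3 : rest = "ACIFIC".toList <;> by_cases h4 : rest = "ACIFIC STANDARD TIME".toList <;>
              by_cases h5 : rest = "ACIFIC DAYLIGHT TIME".toList <;>
            simp_all [nzLoop, nzTzMap, nzDecode, hg, String.ext_iff, List.cons.injEq]
          · -- first letter outside {E, C, M, P}: both sides return none
            have hmk : nzRegions = PySem.Dict.mk
                [('E', "EASTERN"), ('C', "CENTRAL"), ('M', "MOUNTAIN"), ('P', "PACIFIC")] := by decide
            have hg : nzRegions.get? c = none := by
              simp [hmk, PySem.Dict.get?_mk_cons, PySem.Dict.get?,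
                Ne.symm hE, Ne.symm hC, Ne.symm hM, Ne.symm hP]
            simp_all [nzLoop, nzTzMap, nzDecode, hg, String.ext_iff, List.cons.injEq]

-- ===== VERDICT (by name: the statement is the Claim_ definition above) =====
theorem normalize_timezone_spec : Claim_equal_normalize_timezone := by
  intro input_tz _
  unfold Spec_normalize_timezone normalize_timezone normalize_timezone_alt
  have hb : PySem.Str.upper (PySem.Str.strip input_tz)
      = String.ofList (PySem.Chars.upper (PySem.Chars.strip input_tz.toList)) := by
    conv_lhs => rw [← String.ofList_toList (s := PySem.Str.upper (PySem.Str.strip input_tz))]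
    simp
  rw [hb, nz_core_eq]
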